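-- pv_equiv track=rewrite | github.com/GladysWangui/Test3 | intFun.py | digit_count
-- ===== SOURCE A (Python) =====
-- def digit_count(num):
--     zero_count = 0
--     even_count = 0
--     odd_count = 0
--     for i in num:
--         if i == 0:
--             zero_count += 1
--         elif i % 2 == 0:
--             even_count += 1
--         else:
--             odd_count += 1
--     return zero_count, even_count, odd_count
-- ===== SOURCE B (Python) =====
-- def digit_count(num):
--     nums = list(num)
--     zeros = sum(1 for i in nums if i == 0)
--     evens = sum(1 for i in nums if i != 0 and i % 2 == 0)
--     odds = sum(1 for i in nums if i % 2 != 0)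
--     return zeros, evens, odds
-- ===== Notes on version B (the rewrite author's own statement) =====
-- stated objective: alternative
-- what changed: Replaces A's single fused accumulation loop over three counters with three independent generator-sum passes (zeros, nonzero-evens, odds) over a materialized list.
import Mathlib
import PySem

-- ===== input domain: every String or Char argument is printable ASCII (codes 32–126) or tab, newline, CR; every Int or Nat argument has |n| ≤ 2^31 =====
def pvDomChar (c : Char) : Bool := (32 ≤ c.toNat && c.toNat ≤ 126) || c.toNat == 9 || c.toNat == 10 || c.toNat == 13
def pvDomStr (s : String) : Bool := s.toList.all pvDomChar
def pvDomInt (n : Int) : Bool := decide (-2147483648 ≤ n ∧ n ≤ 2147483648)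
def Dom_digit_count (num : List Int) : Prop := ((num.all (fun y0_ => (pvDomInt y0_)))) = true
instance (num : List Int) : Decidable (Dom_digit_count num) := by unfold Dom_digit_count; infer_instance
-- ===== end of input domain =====

-- B replaces A's single fused three-counter loop with three independent counting passes; alternative decomposition, same cost.

-- ===== PORT A =====
-- A: one loop carrying the triple of counters (zero_count, even_count, odd_count).
def digit_count (num : List Int) : Int × Int × Int :=
  let s := num.foldl (fun (acc : Int × Int × Int) i =>
    if i = 0 then (acc.1 + 1, acc.2.1, acc.2.2)
    else if PySem.Int.mod i 2 = 0 then (acc.1, acc.2.1 + 1, acc.2.2)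
    else (acc.1, acc.2.1, acc.2.2 + 1)) (0, 0, 0)
  s

-- ===== PORT B =====
-- B: three independent passes, each a sum of 1 over a condition (ported as countP).
def digit_count_alt (num : List Int) : Int × Int × Int :=
  let zeros : Int := (num.countP (fun i => i = 0)).cast
  let evens : Int := (num.countP (fun i => i ≠ 0 ∧ PySem.Int.mod i 2 = 0)).cast
  let odds : Int := (num.countP (fun i => PySem.Int.mod i 2 ≠ 0)).cast
  (zeros, evens, odds)

-- ===== PRECONDITION & SPEC =====
def Spec_digit_count (num : List Int) (out : Int × Int × Int) : Prop := out = digit_count_alt num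
instance (num : List Int) (out : Int × Int × Int) : Decidable (Spec_digit_count num out) := by unfold Spec_digit_count; infer_instance

-- ===== CLAIM (what is proved, stated in full; the proofs are below) =====
def Claim_equal_digit_count : Prop := ∀ (num : List Int), Dom_digit_count num → Spec_digit_count num (digit_count num)

-- ===== LEMMAS AND PROOFS =====

-- Loop invariant: A's fold starting from any accumulator adds B's three counts componentwise.
theorem digit_count_foldl (num : List Int) (a b c : Int) :
    num.foldl (fun (acc : Int × Int × Int) i =>
      if i = 0 then (acc.1 + 1, acc.2.1, acc.2.2)
      else if PySem.Int.mod i 2 = 0 then (acc.1, acc.2.1 + 1, acc.2.2)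
      else (acc.1, acc.2.1, acc.2.2 + 1)) (a, b, c)
    = (a + (num.countP (fun i => i = 0)).cast,
       b + (num.countP (fun i => i ≠ 0 ∧ PySem.Int.mod i 2 = 0)).cast,
       c + (num.countP (fun i => PySem.Int.mod i 2 ≠ 0)).cast) := by
  induction num generalizing a b c with
  | nil => simp
  | cons x xs ih =>
    simp only [List.foldl_cons, List.countP_cons]
    have hme : PySem.Int.mod x 2 = x % 2 := PySem.Int.mod_eq_emod_of_pos (by norm_num)
    by_cases hx : x = 0
    · rw [if_pos hx, ih]
      simp only [hx, Prod.ext_iff]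
      norm_num
      omega
    · rw [if_neg hx]
      by_cases hm : PySem.Int.mod x 2 = 0
      · rw [if_pos hm, ih]
        rw [hme] at hm
        simp only [hx, hm, hme, Prod.ext_iff]
        norm_num
        omega
      · rw [if_neg hm, ih]
        rw [hme] at hm
        simp only [hx, hm, hme, Prod.ext_iff]
        norm_num
        omega

-- ===== VERDICT (by name: the statement is the Claim_ definition above) =====
theorem digit_count_spec : Claim_equal_digit_count := by
  intro num _
  show digit_count num = digit_count_alt num
  simp only [digit_count, digit_count_alt]
  rw [digit_count_foldl]
  norm_num
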